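-- pv_equiv track=rewrite | github.com/insominiac21/Pdf-Outline-Extractor-end-to-end | pipeline.py | generate_final_answer
-- ===== SOURCE A (Python) =====
-- from typing import List, Dict, Tuple, Optional
--
-- def summarize_chunk(text: str, max_words: int = 50) -> str:
--     """Create a brief summary of chunk text, preserving sentence boundaries."""
--     sentences = text.split(". ")
--     words = []
--     total_words = 0
--
--     for sentence in sentences:
--         sentence_words = sentence.split()
--         if total_words + len(sentence_words) <= max_words:
--             words.extend(sentence_words)
--             total_words += len(sentence_words)
--         else:
--             break
--
--     summary = " ".join(words)
--     return summary + "..." if total_words == max_words else summary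
--
-- def generate_final_answer(query: str, results: List[Dict]) -> str:
--     """Generate a structured final answer from search results."""
--     answer_parts = []
--     answer_parts.append(f"Based on {len(results)} relevant sections, here's a travel plan:")
--
--     # Extract key information
--     answer_parts.append("\n1. Recommended Activities:")
--     for r in results[:2]:  # Use top 2 results for activities
--         if "Things to Do" in r["doc_id"]:
--             summary = summarize_chunk(r["text"], 75)
--             answer_parts.append(f"   • {summary}")
--
--     # Add dining recommendations
--     answer_parts.append("\n2. Dining Options:")
--     for r in results:
--         if "Cuisine" in r["doc_id"] or "Restaurants" in r["doc_id"]: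
--             summary = summarize_chunk(r["text"], 75)
--             answer_parts.append(f"   • {summary}")
--
--     # Add tips
--     answer_parts.append("\n3. Travel Tips:")
--     for r in results:
--         if "Tips" in r["doc_id"]:
--             summary = summarize_chunk(r["text"], 75)
--             answer_parts.append(f"   • {summary}")
--
--     return "\n".join(answer_parts)
-- ===== SOURCE B (Python) =====
-- from typing import List, Dict
--
-- def summarize_chunk(text: str, max_words: int = 50) -> str:
--     """Create a brief summary of chunk text, preserving sentence boundaries."""
--     sentences = text.split(". ")
--     words = []
--     total_words = 0
--
--     for sentence in sentences:
--         sentence_words = sentence.split()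
--         if total_words + len(sentence_words) <= max_words:
--             words.extend(sentence_words)
--             total_words += len(sentence_words)
--         else:
--             break
--
--     summary = " ".join(words)
--     return summary + "..." if total_words == max_words else summary
--
-- def generate_final_answer(query: str, results: List[Dict]) -> str:
--     """Generate a structured final answer from search results (single pass, three buckets)."""
--     activities, dining, tips = [], [], []
--     for i, r in enumerate(results):
--         doc_id = r["doc_id"]
--         if i < 2 and "Things to Do" in doc_id:
--             activities.append("   \u2022 " + summarize_chunk(r["text"], 75))
--         if "Cuisine" in doc_id or "Restaurants" in doc_id:
--             dining.append("   \u2022 " + summarize_chunk(r["text"], 75))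
--         if "Tips" in doc_id:
--             tips.append("   \u2022 " + summarize_chunk(r["text"], 75))
--     lines = [f"Based on {len(results)} relevant sections, here's a travel plan:",
--              "\n1. Recommended Activities:", *activities,
--              "\n2. Dining Options:", *dining,
--              "\n3. Travel Tips:", *tips]
--     return "\n".join(lines)
-- ===== Notes on version B (the rewrite author's own statement) =====
-- stated objective: alternative
-- what changed: B replaces A's three separate scans of results (one sliced to the top 2) by a single enumerate pass maintaining three buckets (activities, dining, tips) with independent ifs, then assembles the header and numbered sections from the prebuilt buckets; summarize_chunk is unchanged.
import Mathlib
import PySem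

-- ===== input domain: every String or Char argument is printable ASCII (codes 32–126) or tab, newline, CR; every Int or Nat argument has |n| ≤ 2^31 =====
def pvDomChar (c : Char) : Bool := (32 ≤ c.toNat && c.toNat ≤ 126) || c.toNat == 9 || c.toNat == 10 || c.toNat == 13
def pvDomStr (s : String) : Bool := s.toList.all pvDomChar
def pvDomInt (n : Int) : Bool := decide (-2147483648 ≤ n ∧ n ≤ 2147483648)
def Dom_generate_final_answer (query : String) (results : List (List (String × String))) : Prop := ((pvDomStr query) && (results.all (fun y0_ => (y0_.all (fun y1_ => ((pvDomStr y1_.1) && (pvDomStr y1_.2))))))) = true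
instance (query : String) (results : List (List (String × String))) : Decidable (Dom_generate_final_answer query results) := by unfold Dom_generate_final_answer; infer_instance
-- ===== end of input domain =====

-- B builds the three sections in ONE pass over enumerate(results) with three buckets instead of A's three separate scans; objective: alternative decomposition (same cost).

-- shared helpers (identical source in Source A and Source B): dict lookup r[k] and summarize_chunk
-- Python r[k] on a dict = first-match lookup; missing key raises KeyError — those inputs are excluded by Pre_, the "" default is never reached there
def pvGetStr (r : List (String × String)) (k : String) : String :=
  ((r.find? (fun p => p.1 == k)).map (·.2)).getD ""

-- the for-loop of summarize_chunk with its break, as structural recursion over the sentences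
def pvSumLoop (maxWords : Int) : List String → List String → Int → List String × Int
  | [], words, total => (words, total)
  | s :: rest, words, total =>
    let sentence_words := PySem.Str.split₀ s
    if total + (sentence_words.length : Int) ≤ maxWords then
      pvSumLoop maxWords rest (words ++ sentence_words) (total + (sentence_words.length : Int))
    else (words, total)

def summarize_chunk (text : String) (max_words : Int) : String :=
  let sentences := (PySem.Chars.splitOn text.toList ". ".toList).map String.ofList  -- text.split(". "), sep nonempty so exact
  let wt := pvSumLoop max_words sentences [] 0
  let summary := PySem.Str.join " " wt.1
  if wt.2 == max_words then summary ++ "..." else summary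

-- ===== PORT A =====
def generate_final_answer (query : String) (results : List (List (String × String))) : String :=
  let answer_parts : List String := []
  let answer_parts := answer_parts ++ ["Based on " ++ PySem.Int.toStr (results.length : Int) ++ " relevant sections, here's a travel plan:"]
  let answer_parts := answer_parts ++ ["\n1. Recommended Activities:"]
  let answer_parts := (PySem.List.slice results none (some 2)).foldl (fun ps r =>
      if PySem.Str.isIn "Things to Do" (pvGetStr r "doc_id") then
        ps ++ ["   • " ++ summarize_chunk (pvGetStr r "text") 75]
      else ps) answer_parts
  let answer_parts := answer_parts ++ ["\n2. Dining Options:"]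
  let answer_parts := results.foldl (fun ps r =>
      if PySem.Str.isIn "Cuisine" (pvGetStr r "doc_id") || PySem.Str.isIn "Restaurants" (pvGetStr r "doc_id") then
        ps ++ ["   • " ++ summarize_chunk (pvGetStr r "text") 75]
      else ps) answer_parts
  let answer_parts := answer_parts ++ ["\n3. Travel Tips:"]
  let answer_parts := results.foldl (fun ps r =>
      if PySem.Str.isIn "Tips" (pvGetStr r "doc_id") then
        ps ++ ["   • " ++ summarize_chunk (pvGetStr r "text") 75]
      else ps) answer_parts
  PySem.Str.join "\n" answer_parts

-- ===== PORT B =====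
-- the body of B's single for-loop: one enumerate item updates the three buckets with independent ifs
def pvBucketStep (acc : List String × List String × List String) (p : Int × List (String × String)) :
    List String × List String × List String :=
  let doc_id := pvGetStr p.2 "doc_id"
  let activities := if decide (p.1 < 2) && PySem.Str.isIn "Things to Do" doc_id then
      acc.1 ++ ["   • " ++ summarize_chunk (pvGetStr p.2 "text") 75] else acc.1
  let dining := if PySem.Str.isIn "Cuisine" doc_id || PySem.Str.isIn "Restaurants" doc_id then
      acc.2.1 ++ ["   • " ++ summarize_chunk (pvGetStr p.2 "text") 75] else acc.2.1
  let tips := if PySem.Str.isIn "Tips" doc_id then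
      acc.2.2 ++ ["   • " ++ summarize_chunk (pvGetStr p.2 "text") 75] else acc.2.2
  (activities, dining, tips)

def generate_final_answer_alt (query : String) (results : List (List (String × String))) : String :=
  let buckets := (PySem.List.enumerate results).foldl pvBucketStep ([], [], [])
  let lines := ["Based on " ++ PySem.Int.toStr (results.length : Int) ++ " relevant sections, here's a travel plan:",
                "\n1. Recommended Activities:"] ++ buckets.1 ++
               "\n2. Dining Options:" :: buckets.2.1 ++
               "\n3. Travel Tips:" :: buckets.2.2
  PySem.Str.join "\n" lines

-- ===== PRECONDITION & SPEC =====
-- Pre_ excludes exactly the inputs on which Python A raises KeyError: a result without a "doc_id" key,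
-- or one whose doc_id matches a section pattern (Things to Do only at index < 2) but which has no "text" key.
def Pre_generate_final_answer (query : String) (results : List (List (String × String))) : Prop :=
  ∀ p ∈ PySem.List.enumerate results,
    (p.2.any (fun q => q.1 == "doc_id")) = true ∧
    (((decide (p.1 < 2) && PySem.Str.isIn "Things to Do" (pvGetStr p.2 "doc_id")) ||
      PySem.Str.isIn "Cuisine" (pvGetStr p.2 "doc_id") ||
      PySem.Str.isIn "Restaurants" (pvGetStr p.2 "doc_id") ||
      PySem.Str.isIn "Tips" (pvGetStr p.2 "doc_id")) = true →
     (p.2.any (fun q => q.1 == "text")) = true)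
instance (query : String) (results : List (List (String × String))) : Decidable (Pre_generate_final_answer query results) := by unfold Pre_generate_final_answer; infer_instance

def pvWitness_generate_final_answer : String × (List (List (String × String))) :=
  ("plan a trip", [[("doc_id", "France - Things to Do"), ("text", "Go hiking. Eat cheese")],
                   [("doc_id", "Tips"), ("text", "Pack light")]])

def Spec_generate_final_answer (query : String) (results : List (List (String × String))) (out : String) : Prop := out = generate_final_answer_alt query results
instance (query : String) (results : List (List (String × String))) (out : String) : Decidable (Spec_generate_final_answer query results out) := by unfold Spec_generate_final_answer; infer_instance

-- ===== CLAIM (what is proved, stated in full; the proofs are below) =====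
def Claim_equal_generate_final_answer : Prop := ∀ (query : String) (results : List (List (String × String))), Dom_generate_final_answer query results → Pre_generate_final_answer query results → Spec_generate_final_answer query results (generate_final_answer query results)

-- ===== LEMMAS AND PROOFS =====

-- abbreviations for the proofs only
def pvBullet (r : List (String × String)) : String := "   • " ++ summarize_chunk (pvGetStr r "text") 75
def pvThings (r : List (String × String)) : Bool := PySem.Str.isIn "Things to Do" (pvGetStr r "doc_id")
def pvDine (r : List (String × String)) : Bool :=
  PySem.Str.isIn "Cuisine" (pvGetStr r "doc_id") || PySem.Str.isIn "Restaurants" (pvGetStr r "doc_id")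
def pvTips (r : List (String × String)) : Bool := PySem.Str.isIn "Tips" (pvGetStr r "doc_id")

lemma pvBucketFold (rs : List (List (String × String))) :
    ∀ (n : Int) (a d t : List String),
    (PySem.List.enumerate rs n).foldl pvBucketStep (a, d, t) =
      (a ++ ((rs.take (2 - n).toNat).filter pvThings).map pvBullet,
       d ++ (rs.filter pvDine).map pvBullet,
       t ++ (rs.filter pvTips).map pvBullet) := by
  induction rs with
  | nil => intro n a d t; simp [PySem.List.enumerate_nil]
  | cons r rs ih =>
    intro n a d t
    rw [PySem.List.enumerate_cons]
    simp only [List.foldl_cons]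
    rw [ih]
    by_cases hn : n < 2
    · have h2 : (2 - n).toNat = (2 - (n + 1)).toNat + 1 := by omega
      rw [h2]
      simp only [List.take_succ_cons, List.filter_cons]
      unfold pvBucketStep pvThings pvDine pvTips pvBullet
      simp only [hn, decide_true, Bool.true_and]
      by_cases h1 : PySem.Str.isIn "Things to Do" (pvGetStr r "doc_id") <;>
        by_cases h2' : (PySem.Str.isIn "Cuisine" (pvGetStr r "doc_id") || PySem.Str.isIn "Restaurants" (pvGetStr r "doc_id")) = true <;>
          by_cases h3 : PySem.Str.isIn "Tips" (pvGetStr r "doc_id") <;>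
            simp_all
    · have h2 : (2 - n).toNat = 0 ∧ (2 - (n + 1)).toNat = 0 := by omega
      rw [h2.1, h2.2]
      simp only [List.take_zero, List.filter_cons]
      unfold pvBucketStep pvThings pvDine pvTips pvBullet
      simp only [hn, decide_false, Bool.false_and, if_neg (by simp : ¬ (false = true))]
      by_cases h2' : (PySem.Str.isIn "Cuisine" (pvGetStr r "doc_id") || PySem.Str.isIn "Restaurants" (pvGetStr r "doc_id")) = true <;>
        by_cases h3 : PySem.Str.isIn "Tips" (pvGetStr r "doc_id") <;>
          simp_all

-- ===== VERDICT (by name: the statement is the Claim_ definition above) =====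
theorem generate_final_answer_spec : Claim_equal_generate_final_answer := by
  intro query results _hdom _hpre
  unfold Spec_generate_final_answer generate_final_answer generate_final_answer_alt
  rw [pvBucketFold]
  simp only []
  rw [show PySem.List.slice results none (some 2) = results.take ((2 : Int)).toNat from
    PySem.List.slice_to results (by norm_num)]
  simp only [PySem.List.foldl_append_if]
  delta pvBullet pvThings pvDine pvTips
  simp [List.append_assoc]
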